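-- pv_equiv track=rewrite | github.com/Warlockobama/DevSecOpsKB | zap-kb/scripts/zap_run_artifact.py | _param_acronym
-- ===== SOURCE A (Python) =====
-- from typing import Any, Dict, Iterable, List, Optional, Sequence, Tuple
--
-- def _param_acronym(text: str) -> str:
--     out: List[str] = []
--     for chunk in filter(None, [c.strip() for c in text.split(" ")]):
--         for token in chunk.replace("_", " ").replace("-", " ").split():
--             token = token.strip()
--             if not token:
--                 continue
--             out.append(token[0].lower())
--             if len(out) >= 8:
--                 break
--         if len(out) >= 8:
--             break
--     return "".join(out)
-- ===== SOURCE B (Python) =====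
-- def _param_acronym(text: str) -> str:
--     res = []
--     start = True
--     for c in text:
--         if c.isspace() or c in "_-":
--             start = True
--         elif start:
--             res.append(c.lower())
--             start = False
--             if len(res) == 8:
--                 break
--     return "".join(res)
-- ===== Notes on version B (the rewrite author's own statement) =====
-- stated objective: simpler
-- what changed: Replaces A's nested split-by-space / strip / delimiter-replacement / split passes over intermediate token lists by a single left-to-right character scan that keeps a start-of-token flag and emits the lowercased first letter of each run of non-delimiter (non-whitespace, non-underscore, non-hyphen) characters, stopping at 8 letters.
import Mathlib
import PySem

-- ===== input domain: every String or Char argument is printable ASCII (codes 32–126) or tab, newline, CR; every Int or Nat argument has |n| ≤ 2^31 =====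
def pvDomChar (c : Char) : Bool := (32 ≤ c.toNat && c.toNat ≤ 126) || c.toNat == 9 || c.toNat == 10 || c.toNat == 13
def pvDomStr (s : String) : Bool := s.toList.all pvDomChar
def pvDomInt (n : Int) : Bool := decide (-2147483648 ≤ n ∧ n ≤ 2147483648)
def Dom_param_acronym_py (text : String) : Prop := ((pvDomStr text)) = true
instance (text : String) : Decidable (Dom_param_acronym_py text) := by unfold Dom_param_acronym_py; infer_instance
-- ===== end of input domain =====

-- B replaces A's nested split/replace/split passes by one character scan with a
-- start-of-token flag (objective: simpler, one pass, no intermediate lists).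

-- ===== PORT A =====
-- inner 'for token in …' loop; 'token[0]' is only reached after the 'if not token: continue'
-- guard, so the nonempty-match is exact (the IndexError branch is unreachable)
def pvInnerA : List (List Char) → List Char → List Char
  | [], out => out
  | t :: rest, out =>
    match PySem.Chars.strip t with
    | [] => pvInnerA rest out
    | c :: _ =>
      let out' := out ++ [PySem.Chars.lowerChar c]
      if 8 ≤ out'.length then out' else pvInnerA rest out'

-- outer 'for chunk in …' loop with its 'if len(out) >= 8: break'
def pvOuterA : List (List Char) → List Char → List Char
  | [], out => out
  | ch :: rest, out =>
    let out' := pvInnerA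
      (PySem.Chars.split₀ (PySem.Chars.replace (PySem.Chars.replace ch ['_'] [' ']) ['-'] [' '])) out
    if 8 ≤ out'.length then out' else pvOuterA rest out'

def param_acronym_py (text : String) : String :=
  String.ofList (pvOuterA
    (((PySem.Chars.splitOn text.toList [' ']).map PySem.Chars.strip).filter (fun c => !c.isEmpty)) [])

-- ===== PORT B =====
def pvDelimB (c : Char) : Bool := PySem.Chars.isspace c || c == '_' || c == '-'

def pvScanB : Bool → List Char → List Char → List Char
  | _, out, [] => out
  | start, out, c :: cs =>
    if pvDelimB c then pvScanB true out cs
    else if start then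
      let out' := out ++ [PySem.Chars.lowerChar c]
      if out'.length = 8 then out' else pvScanB false out' cs
    else pvScanB false out cs

def param_acronym_py_alt (text : String) : String :=
  String.ofList (pvScanB true [] text.toList)

-- ===== PRECONDITION & SPEC =====
def Spec_param_acronym_py (text : String) (out : String) : Prop := out = param_acronym_py_alt text
instance (text : String) (out : String) : Decidable (Spec_param_acronym_py text out) := by unfold Spec_param_acronym_py; infer_instance

-- ===== CLAIM (what is proved, stated in full; the proofs are below) =====
def Claim_equal_param_acronym_py : Prop := ∀ (text : String), Dom_param_acronym_py text → Spec_param_acronym_py text (param_acronym_py text)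

-- ===== LEMMAS AND PROOFS =====

-- the first letters (lowercased) of the maximal runs of non-d characters; the Bool flag is
-- 'we are at a token start'
def pvFd (d : Char → Bool) : Bool → List Char → List Char
  | _, [] => []
  | b, c :: cs =>
    if d c then pvFd d true cs
    else if b then PySem.Chars.lowerChar c :: pvFd d false cs
    else pvFd d false cs

-- the contribution of one token of split₀ to A's out list
def pvG (t : List Char) : List Char :=
  match PySem.Chars.strip t with
  | [] => []
  | c :: _ => [PySem.Chars.lowerChar c]

def pvCurTail (o : Option Char) (t : List Char) : List Char :=
  match o with
  | none => pvFd PySem.Chars.isspace true t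
  | some c0 => PySem.Chars.lowerChar c0 :: pvFd PySem.Chars.isspace false t

theorem pvFd_all_delim (d : Char → Bool) (b : Bool) (w : List Char)
    (h : ∀ c ∈ w, d c = true) : pvFd d b w = [] := by
  induction w generalizing b with
  | nil => rfl
  | cons c cs ih =>
    simp only [pvFd, h c (by simp)]
    exact ih _ (fun x hx => h x (by simp [hx]))

theorem pvFd_append_all_delim (d : Char → Bool) (b : Bool) (a w : List Char)
    (h : ∀ c ∈ w, d c = true) : pvFd d b (a ++ w) = pvFd d b a := by
  induction a generalizing b with
  | nil => simpa using pvFd_all_delim d b w h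
  | cons c cs ih =>
    simp only [List.cons_append, pvFd]
    split_ifs <;> simp [ih]

theorem pvFd_append_delim (d : Char → Bool) (x : Char) (hx : d x = true) :
    ∀ (a : List Char) (b : Bool) (t : List Char),
      pvFd d b (a ++ x :: t) = pvFd d b a ++ pvFd d true t := by
  intro a
  induction a with
  | nil => intro b t; simp [pvFd, hx]
  | cons c cs ih =>
    intro b t
    simp only [List.cons_append, pvFd]
    split_ifs <;> simp [ih]

theorem pvFd_dropWhile (cs : List Char) :
    pvFd pvDelimB true (cs.dropWhile PySem.Chars.isspace) = pvFd pvDelimB true cs := by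
  induction cs with
  | nil => rfl
  | cons c cs ih =>
    by_cases h : PySem.Chars.isspace c = true
    · rw [List.dropWhile_cons_of_pos h, ih]
      simp [pvFd, pvDelimB, h]
    · rw [List.dropWhile_cons_of_neg (by simp [h])]

theorem pvFd_strip (cs : List Char) :
    pvFd pvDelimB true (PySem.Chars.strip cs) = pvFd pvDelimB true cs := by
  unfold PySem.Chars.strip PySem.Chars.rstrip PySem.Chars.lstrip
  rw [← pvFd_dropWhile cs]
  set ls := cs.dropWhile PySem.Chars.isspace with hls
  conv_rhs => rw [← List.reverse_reverse ls, ← List.takeWhile_append_dropWhile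
    (p := PySem.Chars.isspace) (l := ls.reverse)]
  rw [List.reverse_append]
  exact (pvFd_append_all_delim _ _ _ _ (by
    intro c hc
    have := List.mem_takeWhile_imp (List.mem_reverse.mp hc)
    simp [pvDelimB, this])).symm

-- replace with one-character old/new is a map
theorem pvReplace_map (dch nch : Char) (s : List Char) :
    PySem.Chars.replace s [dch] [nch] = s.map (fun c => if c == dch then nch else c) := by
  have go : ∀ (l : List Char) (fuel : Nat) (acc : List Char), l.length ≤ fuel →
      PySem.Chars.replace.go [dch] [nch] fuel l acc
        = acc.reverse ++ l.map (fun c => if c == dch then nch else c) := by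
    intro l
    induction l with
    | nil => intro fuel acc _; cases fuel <;> simp [PySem.Chars.replace.go]
    | cons c t ih =>
      intro fuel acc hlen
      cases fuel with
      | zero => simp at hlen
      | succ fuel =>
        have hlen' : t.length ≤ fuel := by simpa using hlen
        simp only [PySem.Chars.replace.go]
        by_cases h : dch = c
        · subst h
          rw [if_pos (by simp [List.isPrefixOf])]
          simp only [List.length_cons, List.length_nil, List.drop_succ_cons, List.drop_zero,
            List.reverse_cons, List.reverse_nil, List.nil_append]
          rw [ih fuel ([nch] ++ acc) hlen']
          simp
        · rw [if_neg (by simp [List.isPrefixOf, h])]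
          rw [ih fuel (c :: acc) hlen']
          simp [Ne.symm h]
  unfold PySem.Chars.replace
  simp only [List.isEmpty_cons, Bool.false_eq_true, if_false]
  exact go s s.length [] le_rfl


def pvRep (c : Char) : Char :=
  if c == '_' then ' ' else if c == '-' then ' ' else c

theorem pvFd_map (b : Bool) (cs : List Char) :
    pvFd PySem.Chars.isspace b (cs.map pvRep) = pvFd pvDelimB b cs := by
  induction cs generalizing b with
  | nil => rfl
  | cons c cs ih =>
    have hsp : PySem.Chars.isspace (pvRep c) = pvDelimB c := by
      by_cases h1 : c = '_'
      · subst h1; decide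
      · by_cases h2 : c = '-'
        · subst h2; decide
        · have b1 : (c == '_') = false := beq_eq_false_iff_ne.mpr h1
          have b2 : (c == '-') = false := beq_eq_false_iff_ne.mpr h2
          simp [pvRep, pvDelimB, b1, b2]
    have hid : pvDelimB c = false → pvRep c = c := by
      intro h
      simp only [pvDelimB, Bool.or_eq_false_iff, beq_eq_false_iff_ne, ne_eq] at h
      simp [pvRep, h.1.2, h.2]
    simp only [List.map_cons, pvFd, hsp]
    by_cases h : pvDelimB c = true
    · simp [h, ih]
    · simp only [Bool.not_eq_true] at h
      rw [hid h]
      simp [h, ih]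

theorem pvStrip_no_space (s : List Char) (h : ∀ c ∈ s, PySem.Chars.isspace c = false) :
    PySem.Chars.strip s = s := by
  have dw : ∀ (l : List Char), (∀ c ∈ l, PySem.Chars.isspace c = false) →
      l.dropWhile PySem.Chars.isspace = l := by
    intro l hl
    cases l with
    | nil => rfl
    | cons c t => exact List.dropWhile_cons_of_neg (by simp [hl c (by simp)])
  unfold PySem.Chars.strip PySem.Chars.rstrip PySem.Chars.lstrip
  rw [dw s h, dw s.reverse (fun c hc => h c (List.mem_reverse.mp hc)), List.reverse_reverse]

theorem pvG_cons (c0 : Char) (t0 : List Char)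
    (h : ∀ c ∈ c0 :: t0, PySem.Chars.isspace c = false) :
    pvG (c0 :: t0) = [PySem.Chars.lowerChar c0] := by
  unfold pvG
  rw [pvStrip_no_space _ h]

theorem pvMemRev (d : Char) (cur' : List Char) (c0 : Char) (t0 : List Char)
    (hrev : (d :: cur').reverse = c0 :: t0)
    (hcur : ∀ c ∈ d :: cur', PySem.Chars.isspace c = false) :
    ∀ c ∈ c0 :: t0, PySem.Chars.isspace c = false := by
  intro x hx
  exact hcur x (List.mem_reverse.mp (hrev ▸ hx))

theorem pvSplit0_go (t : List Char) : ∀ (cur : List Char) (acc : List (List Char)),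
    (∀ c ∈ cur, PySem.Chars.isspace c = false) →
    (PySem.Chars.split₀.go t cur acc).flatMap pvG
      = acc.reverse.flatMap pvG ++ pvCurTail cur.reverse.head? t := by
  induction t with
  | nil =>
    intro cur acc hcur
    cases cur with
    | nil => simp [PySem.Chars.split₀.go, pvCurTail, pvFd]
    | cons d cur' =>
      obtain ⟨c0, t0, hrev⟩ := List.exists_cons_of_ne_nil
        (show (d :: cur').reverse ≠ [] by simp)
      simp only [PySem.Chars.split₀.go, List.isEmpty_cons, Bool.false_eq_true, if_false]
      have hrev' : cur'.reverse ++ [d] = c0 :: t0 := by simpa using hrev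
      simp only [List.reverse_cons, List.flatMap_append, List.flatMap_cons, List.flatMap_nil,
        List.append_nil, hrev']
      rw [pvG_cons c0 t0 (pvMemRev d cur' c0 t0 hrev hcur)]
      simp [pvCurTail, pvFd]
  | cons c rest ih =>
    intro cur acc hcur
    by_cases hsp : PySem.Chars.isspace c = true
    · cases cur with
      | nil =>
        simp only [PySem.Chars.split₀.go, hsp, if_true, List.isEmpty_nil]
        rw [ih [] acc (by simp)]
        simp [pvCurTail, pvFd, hsp]
      | cons d cur' =>
        obtain ⟨c0, t0, hrev⟩ := List.exists_cons_of_ne_nil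
          (show (d :: cur').reverse ≠ [] by simp)
        simp only [PySem.Chars.split₀.go, hsp, if_true, List.isEmpty_cons, Bool.false_eq_true,
          if_false]
        rw [ih [] ((d :: cur').reverse :: acc) (by simp)]
        have hrev' : cur'.reverse ++ [d] = c0 :: t0 := by simpa using hrev
        simp only [List.reverse_cons, List.flatMap_append, List.flatMap_cons, List.flatMap_nil,
          List.append_nil, hrev']
        rw [pvG_cons c0 t0 (pvMemRev d cur' c0 t0 hrev hcur)]
        simp [pvCurTail, pvFd, hsp]
    · have hsp' : PySem.Chars.isspace c = false := by simpa using hsp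
      simp only [PySem.Chars.split₀.go, hsp', Bool.false_eq_true, if_false]
      rw [ih (c :: cur) acc (by
        intro x hx
        rcases List.mem_cons.mp hx with h | h
        · exact h ▸ hsp'
        · exact hcur x h)]
      congr 1
      cases cur with
      | nil => simp [pvCurTail, pvFd, hsp']
      | cons d cur' =>
        obtain ⟨c0, t0, hrev⟩ := List.exists_cons_of_ne_nil
          (show (d :: cur').reverse ≠ [] by simp)
        have hrev' : cur'.reverse ++ [d] = c0 :: t0 := by simpa using hrev
        simp only [List.reverse_cons, List.append_assoc, List.cons_append, List.nil_append]
        rw [show cur'.reverse ++ [d, c] = (c0 :: t0) ++ [c] by rw [← hrev']; simp, hrev']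
        simp [pvCurTail, pvFd, hsp']

theorem pvSplit0_flatMap (t : List Char) :
    (PySem.Chars.split₀ t).flatMap pvG = pvFd PySem.Chars.isspace true t := by
  unfold PySem.Chars.split₀
  rw [pvSplit0_go t [] [] (by simp)]
  simp [pvCurTail]

theorem pvSplitOn_go (d : Char → Bool) (hd : d ' ' = true) :
    ∀ (fuel : Nat) (l cur : List Char) (acc : List (List Char)), l.length < fuel →
      (PySem.Chars.splitOn.go [' '] fuel l cur acc).flatMap (pvFd d true)
        = acc.reverse.flatMap (pvFd d true) ++ pvFd d true (cur.reverse ++ l) := by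
  intro fuel
  induction fuel with
  | zero => intro l cur acc h; omega
  | succ n ih =>
    intro l cur acc h
    cases l with
    | nil => simp [PySem.Chars.splitOn.go]
    | cons c rest =>
      by_cases hc : c = ' '
      · subst hc
        simp only [PySem.Chars.splitOn.go]
        rw [if_pos (by simp [List.isPrefixOf])]
        simp only [List.length_cons, List.length_nil, List.drop_succ_cons, List.drop_zero]
        rw [ih rest [] (cur.reverse :: acc) (by simpa using h)]
        rw [pvFd_append_delim d ' ' hd cur.reverse true rest]
        simp
      · simp only [PySem.Chars.splitOn.go]
        rw [if_neg (by simp [List.isPrefixOf, Ne.symm hc])]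
        rw [ih rest (c :: cur) acc (by simpa using h)]
        simp

theorem pvSplitOn_flatMap (d : Char → Bool) (hd : d ' ' = true) (s : List Char) :
    (PySem.Chars.splitOn s [' ']).flatMap (pvFd d true) = pvFd d true s := by
  unfold PySem.Chars.splitOn
  rw [pvSplitOn_go d hd (s.length + 1) s [] [] (by omega)]
  simp

-- one chunk of A contributes exactly its first letters
theorem pvChunk (ch : List Char) :
    (PySem.Chars.split₀ (PySem.Chars.replace (PySem.Chars.replace ch ['_'] [' ']) ['-'] [' '])).flatMap pvG
      = pvFd pvDelimB true ch := by
  rw [pvReplace_map, pvReplace_map, List.map_map, pvSplit0_flatMap]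
  have hcomp : ∀ c : Char,
      ((fun c => if c == '-' then ' ' else c) ∘ fun c => if c == '_' then ' ' else c) c
        = pvRep c := by
    intro c
    by_cases h1 : c = '_'
    · subst h1; rfl
    · by_cases h2 : c = '-'
      · subst h2; rfl
      · simp [pvRep, Function.comp, beq_eq_false_iff_ne.mpr h1, beq_eq_false_iff_ne.mpr h2]
  rw [List.map_congr_left (fun a _ => hcomp a), pvFd_map]

theorem pvInnerA_take (tokens : List (List Char)) : ∀ (out : List Char), out.length < 8 →
    pvInnerA tokens out = out ++ (tokens.flatMap pvG).take (8 - out.length) := by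
  induction tokens with
  | nil => intro out h; simp [pvInnerA]
  | cons t rest ih =>
    intro out h
    cases hst : PySem.Chars.strip t with
    | nil =>
      simp only [pvInnerA, hst, List.flatMap_cons, pvG, List.nil_append]
      exact ih out h
    | cons c t0 =>
      simp only [pvInnerA, hst, List.flatMap_cons, pvG]
      by_cases hlen : 8 ≤ (out ++ [PySem.Chars.lowerChar c]).length
      · rw [if_pos hlen]
        have h1 : 8 - out.length = 1 := by simp at hlen; omega
        rw [h1, List.cons_append, List.take_succ_cons, List.take_zero]
      · rw [if_neg hlen]
        rw [ih _ (by simp at hlen ⊢; omega)]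
        have h1 : 8 - out.length = (8 - (out ++ [PySem.Chars.lowerChar c]).length) + 1 := by
          simp at hlen ⊢; omega
        rw [h1, List.cons_append, List.take_succ_cons]
        simp

theorem pvOuterA_take (chunks : List (List Char)) : ∀ (out : List Char), out.length < 8 →
    pvOuterA chunks out
      = out ++ ((chunks.flatMap (pvFd pvDelimB true)).take (8 - out.length)) := by
  induction chunks with
  | nil => intro out h; simp [pvOuterA]
  | cons ch rest ih =>
    intro out h
    simp only [pvOuterA, List.flatMap_cons]
    rw [pvInnerA_take _ out h, pvChunk]
    set L := pvFd pvDelimB true ch with hL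
    by_cases hlen : 8 ≤ (out ++ L.take (8 - out.length)).length
    · rw [if_pos hlen]
      have hl : 8 - out.length ≤ L.length := by
        simp only [List.length_append, List.length_take] at hlen; omega
      rw [List.take_append, Nat.sub_eq_zero_of_le hl, List.take_zero, List.append_nil]
    · rw [if_neg hlen]
      have hl : L.length < 8 - out.length := by
        simp only [List.length_append, List.length_take] at hlen
        omega
      have htake : L.take (8 - out.length) = L := List.take_of_length_le (by omega)
      rw [htake] at hlen ⊢
      rw [ih _ (by simp at hlen ⊢; omega)]
      rw [List.take_append, htake, List.append_assoc]
      congr 3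
      simp
      omega

theorem pvScanB_take (cs : List Char) : ∀ (b : Bool) (out : List Char), out.length < 8 →
    pvScanB b out cs = out ++ (pvFd pvDelimB b cs).take (8 - out.length) := by
  induction cs with
  | nil => intro b out h; simp [pvScanB, pvFd]
  | cons c rest ih =>
    intro b out h
    by_cases hc : pvDelimB c = true
    · simp only [pvScanB, pvFd, hc, if_true]
      exact ih true out h
    · rw [show pvScanB b out (c :: rest) = (if b then
          (let out' := out ++ [PySem.Chars.lowerChar c]
           if out'.length = 8 then out' else pvScanB false out' rest)
          else pvScanB false out rest) by simp [pvScanB, hc]]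
      rw [show pvFd pvDelimB b (c :: rest) = (if b then
          PySem.Chars.lowerChar c :: pvFd pvDelimB false rest
          else pvFd pvDelimB false rest) by simp [pvFd, hc]]
      cases b with
      | false =>
        simp only [if_false, Bool.false_eq_true]
        exact ih false out h
      | true =>
        simp only [if_true]
        by_cases hlen : (out ++ [PySem.Chars.lowerChar c]).length = 8
        · simp only [hlen, if_true]
          have h1 : 8 - out.length = 1 := by simp at hlen; omega
          rw [h1, List.take_succ_cons, List.take_zero]
        · rw [if_neg hlen]
          rw [ih false _ (by simp at hlen ⊢; omega)]
          have h1 : 8 - out.length = (8 - (out ++ [PySem.Chars.lowerChar c]).length) + 1 := by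
            simp at hlen ⊢; omega
          rw [h1, List.take_succ_cons]
          simp

theorem pvFilter_flatMap (f : List Char → List Char) (hf : f [] = []) (xs : List (List Char)) :
    (xs.filter (fun c => !c.isEmpty)).flatMap f = xs.flatMap f := by
  induction xs with
  | nil => rfl
  | cons x rest ih =>
    cases x with
    | nil => simpa [hf] using ih
    | cons c t => simpa using ih

theorem pvA_char (cs : List Char) :
    pvOuterA (((PySem.Chars.splitOn cs [' ']).map PySem.Chars.strip).filter (fun c => !c.isEmpty)) []
      = (pvFd pvDelimB true cs).take 8 := by
  rw [pvOuterA_take _ [] (by simp)]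
  rw [pvFilter_flatMap _ (by rfl)]
  have hmap : ((PySem.Chars.splitOn cs [' ']).map PySem.Chars.strip).flatMap (pvFd pvDelimB true)
      = (PySem.Chars.splitOn cs [' ']).flatMap (pvFd pvDelimB true) := by
    rw [List.flatMap_map]
    exact List.flatMap_congr (fun x _ => pvFd_strip x)
  rw [hmap, pvSplitOn_flatMap pvDelimB (by decide)]
  simp

-- ===== VERDICT (by name: the statement is the Claim_ definition above) =====
theorem param_acronym_py_spec : Claim_equal_param_acronym_py := by
  intro text _
  show param_acronym_py text = param_acronym_py_alt text
  unfold param_acronym_py param_acronym_py_alt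
  rw [pvA_char, pvScanB_take _ _ _ (by simp)]
  rfl
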